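-- pv_equiv track=rewrite | github.com/DiegoLoz65/AlgoritmoBanquero | Banquero.py | VectorDisponibles
-- ===== SOURCE A (Python) =====
-- def VectorDisponibles(MAA, A, E):
--     i=0
--     A=[]
--     while i < len(MAA[0]):
--         sum = 0
--         for j in MAA:
--             sum += j[i]
--         A.append(E[i] - sum)
--         i += 1
--     return A
-- ===== SOURCE B (Python) =====
-- def VectorDisponibles(MAA, A, E):
--     # Row-major accumulator pass: start from E's prefix, subtract each row.
--     n = len(MAA[0])
--     res = [E[i] for i in range(n)]
--     for row in MAA:
--         res = [res[i] - row[i] for i in range(n)]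
--     return res
-- ===== Notes on version B (the rewrite author's own statement) =====
-- stated objective: alternative
-- what changed: B maintains a running partial-result vector across a row-major pass (res[i] -= row[i] per row) instead of A's column-major while loop that completes one full column sum at a time.
import Mathlib
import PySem

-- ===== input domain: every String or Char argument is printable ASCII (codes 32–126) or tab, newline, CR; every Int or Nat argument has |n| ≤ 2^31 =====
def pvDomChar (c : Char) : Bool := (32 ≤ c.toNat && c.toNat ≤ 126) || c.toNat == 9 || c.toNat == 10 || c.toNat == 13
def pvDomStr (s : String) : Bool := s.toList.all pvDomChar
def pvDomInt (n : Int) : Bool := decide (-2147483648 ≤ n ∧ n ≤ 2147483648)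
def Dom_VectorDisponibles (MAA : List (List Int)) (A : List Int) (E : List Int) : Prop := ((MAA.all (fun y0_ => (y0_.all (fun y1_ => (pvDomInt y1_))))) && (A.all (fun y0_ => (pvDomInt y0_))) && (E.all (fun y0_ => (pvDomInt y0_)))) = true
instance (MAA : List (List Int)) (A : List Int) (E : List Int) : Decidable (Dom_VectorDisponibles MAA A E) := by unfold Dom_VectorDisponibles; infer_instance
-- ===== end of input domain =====

-- B replaces A's column-major while loop by a row-major pass over a running result vector; objective: alternative decomposition, same cost.

-- ===== PORT A =====
-- A: while i < len(MAA[0]): sum column i over all rows, append E[i]-sum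
def VectorDisponibles (MAA : List (List Int)) (A : List Int) (E : List Int) : List Int :=
  (PySem.List.pyRange 0 ((PySem.List.pyGetD MAA 0 []).length : Int) 1).foldl
    (fun acc i =>
      acc ++ [PySem.List.pyGetD E i 0 -
               MAA.foldl (fun s j => s + PySem.List.pyGetD j i 0) 0]) []

-- ===== PORT B =====
-- B: res = [E[i] for i in range(n)]; for row in MAA: res = [res[i] - row[i] for i in range(n)]
def VectorDisponibles_alt (MAA : List (List Int)) (A : List Int) (E : List Int) : List Int :=
  let n : Int := ((PySem.List.pyGetD MAA 0 []).length : Int)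
  let res := (PySem.List.pyRange 0 n 1).map (fun i => PySem.List.pyGetD E i 0)
  MAA.foldl
    (fun res row =>
      (PySem.List.pyRange 0 n 1).map
        (fun i => PySem.List.pyGetD res i 0 - PySem.List.pyGetD row i 0))
    res

-- ===== PRECONDITION & SPEC =====
-- Pre_ excludes exactly the inputs where Python A raises IndexError: empty MAA (MAA[0]),
-- a row shorter than row 0 (j[i]), or E shorter than row 0 (E[i]).
def Pre_VectorDisponibles (MAA : List (List Int)) (A : List Int) (E : List Int) : Prop :=
  MAA ≠ [] ∧ (∀ row ∈ MAA, (MAA.headD []).length ≤ row.length) ∧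
    (MAA.headD []).length ≤ E.length
instance (MAA : List (List Int)) (A : List Int) (E : List Int) : Decidable (Pre_VectorDisponibles MAA A E) := by unfold Pre_VectorDisponibles; infer_instance
def pvWitness_VectorDisponibles : List (List Int) × List Int × List Int :=
  ([[1, 2], [3, 4]], [], [10, 20])

def Spec_VectorDisponibles (MAA : List (List Int)) (A : List Int) (E : List Int) (out : List Int) : Prop := out = VectorDisponibles_alt MAA A E
instance (MAA : List (List Int)) (A : List Int) (E : List Int) (out : List Int) : Decidable (Spec_VectorDisponibles MAA A E out) := by unfold Spec_VectorDisponibles; infer_instance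

-- ===== CLAIM (what is proved, stated in full; the proofs are below) =====
def Claim_equal_VectorDisponibles : Prop := ∀ (MAA : List (List Int)) (A : List Int) (E : List Int), Dom_VectorDisponibles MAA A E → Pre_VectorDisponibles MAA A E → Spec_VectorDisponibles MAA A E (VectorDisponibles MAA A E)

-- ===== LEMMAS AND PROOFS =====

-- column sum of `rows` at index i, as A's inner fold computes it
def pvColSum (rows : List (List Int)) (i : Int) : Int :=
  rows.foldl (fun s j => s + PySem.List.pyGetD j i 0) 0

theorem pvColSum_cons (r : List Int) (rows : List (List Int)) (i : Int) :
    pvColSum (r :: rows) i = PySem.List.pyGetD r i 0 + pvColSum rows i := by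
  unfold pvColSum
  simp only [List.foldl_cons, Int.zero_add]
  rw [PySem.List.foldl_add rows (fun j => PySem.List.pyGetD j i 0) (PySem.List.pyGetD r i 0),
      PySem.List.foldl_add rows (fun j => PySem.List.pyGetD j i 0) 0]
  ring

-- B's row pass, started on an arbitrary comprehension over range n, computes g minus the column sums
theorem pv_rowpass (rows : List (List Int)) (n : Int) (g : Int → Int) :
    rows.foldl
      (fun res row =>
        (PySem.List.pyRange 0 n 1).map
          (fun i => PySem.List.pyGetD res i 0 - PySem.List.pyGetD row i 0))
      ((PySem.List.pyRange 0 n 1).map g)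
    = (PySem.List.pyRange 0 n 1).map (fun i => g i - pvColSum rows i) := by
  induction rows generalizing g with
  | nil => simp [pvColSum]
  | cons r rest ih =>
    simp only [List.foldl_cons]
    have hstep :
        (PySem.List.pyRange 0 n 1).map
          (fun i => PySem.List.pyGetD ((PySem.List.pyRange 0 n 1).map g) i 0 -
                     PySem.List.pyGetD r i 0)
        = (PySem.List.pyRange 0 n 1).map (fun i => g i - PySem.List.pyGetD r i 0) := by
      apply List.map_congr_left
      intro i hi
      rw [PySem.List.mem_pyRange_one] at hi
      rw [PySem.List.pyGetD_map_pyRange_of_nonneg g n i 0 hi.1 hi.2]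
    rw [hstep, ih (fun i => g i - PySem.List.pyGetD r i 0)]
    apply List.map_congr_left
    intro i _
    rw [pvColSum_cons]
    ring

-- ===== VERDICT (by name: the statement is the Claim_ definition above) =====
theorem VectorDisponibles_spec : Claim_equal_VectorDisponibles := by
  intro MAA A E _ _
  unfold Spec_VectorDisponibles VectorDisponibles VectorDisponibles_alt
  rw [PySem.List.foldl_append_singleton_eq_map]
  rw [pv_rowpass MAA ((PySem.List.pyGetD MAA 0 []).length : Int)
        (fun i => PySem.List.pyGetD E i 0)]
  apply List.map_congr_left
  intro i _
  unfold pvColSum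
  ring_nf
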